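-- pv_equiv track=rewrite | github.com/SobanAnjum07/Codeforces | 489C - Given Length and Sum of Digits.py | sol
-- ===== SOURCE A (Python) =====
-- def sol(m:int, s:int):
--
--     if (s == 0 and m > 1) or (s > 9 * m): return -1, -1
--
--     #! largest
--
--     remaining_sum = s ; largest = ""
--
--     for i in range(m):
--
--         digit = min(9, remaining_sum)
--         largest += str(digit)
--         remaining_sum -= digit
--
--
--     #! smallest
--
--     remaining_sum = s
--     smallest = ["0"] * m ; smallest[0] = 1
--     remaining_sum -= 1
--
--     for i in range(m-1, 0 ,-1):
--
--         if remaining_sum > 0: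
--
--             digit = min(9, remaining_sum)
--             remaining_sum -= int(digit)
--             smallest[i] = str(digit)
--
--
--     smallest[0] = str(int(smallest[0]) + remaining_sum)
--
--     return int("".join(smallest)) , int(largest)
-- ===== SOURCE B (Python) =====
-- def sol(m: int, s: int):
--     if (s == 0 and m > 1) or (s > 9 * m):
--         return -1, -1
--     if s == 0:
--         return 0, 0  # guard above guarantees m == 1 here
--     largest = 0
--     rem = s
--     smallest = 0
--     rem2 = s
--     for i in range(m):
--         d = min(9, rem)
--         largest = largest * 10 + d
--         rem -= d
--         lo = 1 if i == 0 else 0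
--         e = max(lo, rem2 - 9 * (m - 1 - i))
--         smallest = smallest * 10 + e
--         rem2 -= e
--     return smallest, largest
-- ===== Notes on version B (the rewrite author's own statement) =====
-- stated objective: alternative
-- what changed: B builds both numbers purely arithmetically in one forward pass: the smallest number uses a left-to-right feasibility greedy (minimal digit d with remaining-d <= 9*(positions left), d>=1 at the leading position) instead of A's right-to-left 9-filling over a list of strings with a final correction added to digit 0, and no string join/int() round-trips are used.
-- outside the precondition, e.g. on sol(2, -5): A returns (-50, -50), B returns (10, -50); on sol(1, -1): A returns (-1, -1), B returns (1, -1)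
import Mathlib
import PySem

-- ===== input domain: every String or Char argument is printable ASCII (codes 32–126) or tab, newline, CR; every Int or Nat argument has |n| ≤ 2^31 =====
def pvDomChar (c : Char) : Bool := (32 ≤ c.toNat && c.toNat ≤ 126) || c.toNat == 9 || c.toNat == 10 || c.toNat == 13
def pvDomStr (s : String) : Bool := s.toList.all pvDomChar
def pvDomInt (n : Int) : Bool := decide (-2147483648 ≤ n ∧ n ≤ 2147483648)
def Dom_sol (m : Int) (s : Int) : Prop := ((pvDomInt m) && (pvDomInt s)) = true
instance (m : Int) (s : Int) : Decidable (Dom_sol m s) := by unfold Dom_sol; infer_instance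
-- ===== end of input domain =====

-- B computes both numbers arithmetically in one forward pass (feasibility-greedy minimal digit for
-- the smallest number) instead of A's string building with a right-to-left 9-fill and head patch.


-- ===== PORT A =====
-- Python's int(x) applied to the nonempty '0'-'9'-only strings this program builds: the decimal
-- value fold, exact exactly there (general int() is PySem.Int.ofStr?; its parser internals are
-- private to PySem, so the digit-string case A needs is ported by hand, step for step).
def pyIntDigits (s : String) : Int :=
  s.toList.foldl (fun a c => 10 * a + ((c.toNat : Int) - 48)) 0

def sol (m : Int) (s : Int) : Int × Int :=
  if (s = 0 ∧ 1 < m) ∨ 9 * m < s then (-1, -1)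
  else
    -- largest: left-to-right max fill, appended to a string
    let lg := (PySem.List.pyRange 0 m 1).foldl
      (fun (st : String × Int) _ =>
        let digit := min 9 st.2
        (st.1 ++ PySem.Int.toStr digit, st.2 - digit)) ("", s)
    -- smallest: ["0"]*m, smallest[0] = 1 (Python stores the int 1; it is only read back through
    -- int(smallest[0]), so it is ported as the string "1", same value), right-to-left fill
    let small0 : List String := (List.replicate m.toNat "0").set 0 "1"
    let st := (PySem.List.pyRange (m - 1) 0 (-1)).foldl
      (fun (st : Int × List String) i =>
        if 0 < st.1 then
          let digit := min 9 st.1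
          (st.1 - digit, st.2.set i.toNat (PySem.Int.toStr digit))
        else st) (s - 1, small0)
    let fixed := st.2.set 0
      (PySem.Int.toStr (pyIntDigits ((PySem.List.pyGet? st.2 0).getD "") + st.1))
    (pyIntDigits (PySem.Str.join "" fixed), pyIntDigits lg.1)

-- ===== PORT B =====
def sol_alt (m : Int) (s : Int) : Int × Int :=
  if (s = 0 ∧ 1 < m) ∨ 9 * m < s then (-1, -1)
  else if s = 0 then (0, 0)   -- the guard above guarantees m = 1 here
  else
    let st := (PySem.List.pyRange 0 m 1).foldl
      (fun (st : (Int × Int) × (Int × Int)) i =>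
        let d := min 9 st.1.2
        let lo : Int := if i = 0 then 1 else 0
        let e := max lo (st.2.2 - 9 * (m - 1 - i))
        ((st.1.1 * 10 + d, st.1.2 - d), (st.2.1 * 10 + e, st.2.2 - e)))
      ((0, s), (0, s))
    (st.2.1, st.1.1)

-- ===== PRECONDITION & SPEC =====
-- Pre_ excludes (a) m ≤ 0 with s ≤ 9*m and ¬(s = 0 ∧ 1 < m), where Python A raises IndexError, and
-- (b) m ≥ 1 with s < 0, which lies outside the problem's natural domain (a digit sum is
-- nonnegative) and is not caught by the guards; A's and B's fill loops return different values
-- there, e.g. at m=2, s=-5 A returns -50 twice while B returns 10 and -50.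
def Pre_sol (m : Int) (s : Int) : Prop := (s = 0 ∧ 1 < m) ∨ 9 * m < s ∨ (1 ≤ m ∧ 0 ≤ s)
instance (m : Int) (s : Int) : Decidable (Pre_sol m s) := by unfold Pre_sol; infer_instance
def pvWitness_sol : Int × Int := (3, 20)
def Spec_sol (m : Int) (s : Int) (out : Int × Int) : Prop := out = sol_alt m s
instance (m : Int) (s : Int) (out : Int × Int) : Decidable (Spec_sol m s out) := by unfold Spec_sol; infer_instance

-- ===== CLAIM (what is proved, stated in full; the proofs are below) =====
def Claim_equal_sol : Prop := ∀ (m : Int) (s : Int), Dom_sol m s → Pre_sol m s → Spec_sol m s (sol m s)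

-- ===== LEMMAS AND PROOFS =====

-- decimal value of a character list (pyIntDigits on the list side)
def valChars (cs : List Char) : Int := cs.foldl (fun a c => 10 * a + ((c.toNat : Int) - 48)) 0

theorem valChars_foldl_acc (cs : List Char) : ∀ (a : Int),
    cs.foldl (fun a c => 10 * a + ((c.toNat : Int) - 48)) a
      = a * 10 ^ cs.length + valChars cs := by
  induction cs with
  | nil => intro a; simp [valChars]
  | cons c t ih =>
      intro a
      simp only [List.foldl_cons, List.length_cons, valChars]
      rw [ih, ih (10 * 0 + ((c.toNat : Int) - 48))]
      ring

theorem valChars_append (a b : List Char) :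
    valChars (a ++ b) = valChars a * 10 ^ b.length + valChars b := by
  unfold valChars
  rw [List.foldl_append, valChars_foldl_acc]
  rfl

-- str(d) for a single digit d
theorem toStr_digit (d : Int) (h0 : 0 ≤ d) (h9 : d ≤ 9) :
    (PySem.Int.toStr d).toList.length = 1 ∧ valChars (PySem.Int.toStr d).toList = d := by
  interval_cases d <;> decide

-- descending range, step -1
theorem pyRange_neg_one_cons (a : Int) (h : 0 < a) :
    PySem.List.pyRange a 0 (-1) = a :: PySem.List.pyRange (a - 1) 0 (-1) := by
  simp only [PySem.List.pyRange]
  norm_num [h]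
  have hn : a.toNat = (a - 1).toNat + 1 := by omega
  rw [hn, List.range_succ_eq_map]
  by_cases h1 : (1:Int) < a
  · rw [if_pos h1]
    have h2 : (a-1).toNat + 1 - 1 = (a-1).toNat := rfl
    rw [h2, List.map_cons, List.map_map]
    congr 1
    · norm_num
    · apply List.map_congr_left
      intro k _
      simp only [Function.comp_apply]
      push_cast
      ring
  · have : a = 1 := by omega
    subst this
    norm_num

theorem pyRange_one_nil (a b : Int) (h : b ≤ a) : PySem.List.pyRange a b 1 = [] := by
  simp [PySem.List.pyRange, show ¬ a < b by omega]

-- "".join on the list side is flatten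
theorem join_empty_sep (l : List String) :
    (PySem.Str.join "" l).toList = (l.map String.toList).flatten := by
  rw [PySem.Str.toList_join]
  show PySem.Chars.join [] (l.map String.toList) = _
  induction l with
  | nil => simp [PySem.Chars.join_nil]
  | cons p t ih =>
      cases t with
      | nil => simp [PySem.Chars.join_singleton]
      | cons q r =>
          simp only [List.map_cons] at ih ⊢
          rw [PySem.Chars.join_cons_cons]
          simp only [List.flatten_cons] at ih ⊢
          rw [ih]
          simp

-- coupling of A's string-building largest loop with B's numeric largest loop
theorem couple_largest (l : List Int) : ∀ (str : String) (acc rem : Int),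
    valChars str.toList = acc → 0 ≤ rem →
    (valChars ((l.foldl (fun (st : String × Int) _ =>
        (st.1 ++ PySem.Int.toStr (min 9 st.2), st.2 - min 9 st.2)) (str, rem)).1).toList
      = (l.foldl (fun (p : Int × Int) (_ : Int) =>
          (p.1 * 10 + min 9 p.2, p.2 - min 9 p.2)) (acc, rem)).1) := by
  induction l with
  | nil => intro str acc rem hv _; simpa using hv
  | cons x t ih =>
      intro str acc rem hv hrem
      simp only [List.foldl_cons]
      apply ih
      · have hd := toStr_digit (min 9 rem) (by omega) (by omega)
        rw [String.toList_append, valChars_append, hd.1, hd.2, hv]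
        ring
      · omega

-- the digit strings A's right-to-left fill writes into positions m-1 … 1 (leftmost entry first)
def hFill : Nat → Int → List String
  | 0, _ => []
  | j + 1, t =>
      if 0 < t then hFill j (t - min 9 t) ++ [PySem.Int.toStr (min 9 t)]
      else hFill j t ++ ["0"]

-- A's smallest loop: remaining sum and list shape after the whole descending fold
theorem A_small_loop : ∀ (j : Nat) (t : Int) (done : List String), 0 ≤ t →
    (PySem.List.pyRange (j : Int) 0 (-1)).foldl
      (fun (st : Int × List String) i =>
        if 0 < st.1 then (st.1 - min 9 st.1, st.2.set i.toNat (PySem.Int.toStr (min 9 st.1)))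
        else st) (t, ("1" :: List.replicate j "0") ++ done)
    = (max 0 (t - 9 * j), ("1" :: hFill j t) ++ done) := by
  intro j
  induction j with
  | zero =>
      intro t done h0
      simp only [Nat.cast_zero]
      rw [show PySem.List.pyRange 0 0 (-1) = [] from by decide]
      simp [hFill]
      omega
  | succ k ih =>
      intro t done h0
      rw [show ((k+1 : Nat) : Int) = ((k:Int) + 1) from by push_cast; ring,
          pyRange_neg_one_cons _ (by omega),
          show ((k:Int) + 1 - 1) = (k : Int) from by ring]
      rw [List.foldl_cons]
      by_cases ht : 0 < t
      · rw [if_pos ht]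
        simp only
        have hidx : ((k:Int) + 1).toNat = k + 1 := by omega
        rw [hidx]
        have hset : (("1" :: List.replicate (k+1) "0") ++ done).set (k+1) (PySem.Int.toStr (min 9 t))
            = ("1" :: List.replicate k "0") ++ ([PySem.Int.toStr (min 9 t)] ++ done) := by
          rw [List.cons_append, List.set_cons_succ, List.replicate_succ', List.append_assoc,
            List.set_append]
          simp
        rw [hset, ih (t - min 9 t) _ (by omega), Prod.mk.injEq]
        constructor
        · omega
        · simp [hFill, if_pos ht, List.cons_append, List.append_assoc]
      · rw [if_neg ht]
        have ht0 : t = 0 := by omega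
        subst ht0
        have hre : ("1" :: List.replicate (k+1) "0") ++ done
            = ("1" :: List.replicate k "0") ++ (["0"] ++ done) := by
          simp [List.replicate_succ']
        rw [hre, ih 0 _ (by omega), Prod.mk.injEq]
        constructor
        · omega
        · simp [hFill, List.cons_append, List.append_assoc]

-- value and length of the filled suffix
theorem hFill_val (j : Nat) (t : Int) (h0 : 0 ≤ t) :
    ((hFill j t).map String.toList).flatten.length = j ∧
    valChars ((hFill j t).map String.toList).flatten
      = (min t (9 * j) % 9 + 1) * 10 ^ ((min t (9 * j) / 9).toNat) - 1 := by
  induction j generalizing t with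
  | zero =>
      constructor
      · simp [hFill]
      · simp [hFill, valChars, min_eq_right h0]
  | succ k ih =>
      by_cases ht : 0 < t
      · have hd := toStr_digit (min 9 t) (by omega) (by omega)
        have ih' := ih (t - min 9 t) (by omega)
        simp only [hFill, if_pos ht, List.map_append, List.flatten_append, List.map_cons,
          List.map_nil, List.flatten_cons, List.flatten_nil, List.append_nil]
        refine ⟨by rw [List.length_append, ih'.1, hd.1], ?_⟩
        rw [valChars_append, hd.1, hd.2, pow_one]
        by_cases h9 : 9 ≤ t
        · have hmin : min 9 t = 9 := by omega
          rw [hmin] at ih' ⊢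
          rw [ih'.2]
          push_cast
          by_cases hbig : 9 * (k:Int) ≤ t - 9
          · rw [show min (t-9) (9*(k:Int)) = 9*(k:Int) from by omega,
                show min t (9*((k:Int)+1)) = 9*((k:Int)+1) from by omega,
                show (9*(k:Int)) % 9 = 0 from by omega,
                show (9*((k:Int)+1)) % 9 = 0 from by omega,
                show ((9*(k:Int))/9) = (k:Int) from by omega,
                show ((9*((k:Int)+1))/9) = (k:Int)+1 from by omega,
                Int.toNat_natCast,
                show ((k:Int)+1).toNat = k+1 from by omega]
            rw [pow_succ]
            ring
          · rw [show min (t-9) (9*(k:Int)) = t - 9 from by omega,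
                show min t (9*((k:Int)+1)) = t from by omega,
                show (t-9) % 9 = t % 9 from by omega,
                show (t-9)/9 = t/9 - 1 from by omega]
            have d3 : ((t/9 - 1).toNat) + 1 = (t/9).toNat := by omega
            have : (10:Int) ^ ((t/9).toNat) = 10 ^ ((t/9-1).toNat) * 10 := by
              rw [← pow_succ, d3]
            rw [this]
            ring
        · have hmin : min 9 t = t := by omega
          rw [hmin] at ih' ⊢
          rw [sub_self] at ih' ⊢
          rw [show min (0:Int) (9*(k:Int)) = 0 from by omega] at ih'
          rw [ih'.2]
          push_cast
          rw [show min t (9*((k:Int)+1)) = t from by omega,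
              show (t % 9) = t from by omega,
              show t/9 = 0 from by omega]
          norm_num
      · have hteq : t = 0 := by omega
        subst hteq
        have ih' := ih 0 (by omega)
        rw [show min (0:Int) (9*(k:Int)) = 0 from by omega] at ih'
        simp only [hFill, if_neg ht, List.map_append, List.flatten_append, List.map_cons,
          List.map_nil, List.flatten_cons, List.flatten_nil, List.append_nil]
        refine ⟨by rw [List.length_append, ih'.1]; rfl, ?_⟩
        rw [valChars_append, ih'.2]
        push_cast
        rw [show min (0:Int) (9*((k:Int)+1)) = 0 from by omega]
        norm_num [valChars]
        decide

-- B's smallest loop over indices m-k … m-1 (all with lo = 0)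
theorem B_small_loop (m : Int) : ∀ (k : Nat) (acc r2 : Int), 1 ≤ m - k → 0 ≤ r2 → r2 ≤ 9 * k →
    ((PySem.List.pyRange (m - k) m 1).foldl
      (fun (q : Int × Int) (i : Int) =>
        (q.1 * 10 + max (if i = 0 then 1 else 0) (q.2 - 9 * (m - 1 - i)),
         q.2 - max (if i = 0 then 1 else 0) (q.2 - 9 * (m - 1 - i)))) (acc, r2)).1
    = acc * 10 ^ k + (r2 % 9 + 1) * 10 ^ ((r2 / 9).toNat) - 1 := by
  intro k
  induction k with
  | zero =>
      intro acc r2 h1 h2 h3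
      have hz : r2 = 0 := by omega
      subst hz
      rw [show m - ((0:Nat):Int) = m from by push_cast; ring, pyRange_one_nil m m le_rfl]
      norm_num
  | succ k ih =>
      intro acc r2 h1 h2 h3
      have hcast : m - ((k+1:Nat):Int) = m - (k:Int) - 1 := by push_cast; ring
      rw [hcast, PySem.List.pyRange_one_cons (by omega), List.foldl_cons]
      simp only
      rw [if_neg (by omega : ¬ (m - (k:Int) - 1 = 0))]
      rw [show m - 1 - (m - (k:Int) - 1) = (k:Int) from by ring]
      rw [show m - (k:Int) - 1 + 1 = m - (k:Int) from by ring]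
      have hmax : max 0 (r2 - 9 * (k:Int)) = if 9 * (k:Int) ≤ r2 then r2 - 9*k else 0 := by
        split_ifs <;> omega
      by_cases hbig : 9 * (k:Int) ≤ r2
      · rw [ih (acc * 10 + max 0 (r2 - 9*(k:Int))) (r2 - max 0 (r2 - 9*(k:Int)))
            (by omega) (by omega) (by omega)]
        rw [hmax, if_pos hbig]
        rw [show r2 - (r2 - 9*(k:Int)) = 9*(k:Int) from by ring]
        rw [show (9*(k:Int)) % 9 = 0 from by omega,
            show (9*(k:Int)) / 9 = (k:Int) from by omega,
            Int.toNat_natCast]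
        by_cases hlt : r2 < 9 * ((k:Int)+1)
        · rw [show r2 % 9 = r2 - 9*(k:Int) from by omega,
              show r2 / 9 = (k:Int) from by omega,
              Int.toNat_natCast, pow_succ]
          ring
        · rw [show r2 % 9 = 0 from by omega,
              show r2 / 9 = (k:Int)+1 from by omega,
              show ((k:Int)+1).toNat = k+1 from by omega,
              pow_succ]
          rw [show r2 - 9*(k:Int) = (9:Int) from by omega]
          ring
      · rw [ih (acc * 10 + max 0 (r2 - 9*(k:Int))) (r2 - max 0 (r2 - 9*(k:Int)))
            (by omega) (by omega) (by omega)]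
        rw [hmax, if_neg hbig]
        rw [show r2 - (0:Int) = r2 from by ring, pow_succ]
        ring

-- main case s ≥ 1, m ≥ 1, s ≤ 9m
theorem main_case (m s : Int) (hm : 1 ≤ m) (hs : 1 ≤ s) (hub : s ≤ 9 * m) :
    sol m s = sol_alt m s := by
  have hg : ¬ ((s = 0 ∧ 1 < m) ∨ 9 * m < s) := by omega
  have hs0 : ¬ s = 0 := by omega
  rw [sol, sol_alt, if_neg hg, if_neg hg, if_neg hs0]
  simp only
  have hmt : m.toNat = (m-1).toNat + 1 := by omega
  have hj : (((m-1).toNat : Nat) : Int) = m - 1 := by omega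
  have hsmall0 : (List.replicate m.toNat "0").set 0 "1"
      = "1" :: List.replicate (m-1).toNat "0" := by
    rw [hmt, List.replicate_succ, List.set_cons_zero]
  have hA := A_small_loop (m-1).toNat (s-1) [] (by omega)
  rw [List.append_nil, List.append_nil, hj] at hA
  rw [hsmall0, hA]
  simp only
  have hget : (PySem.List.pyGet? ("1" :: hFill (m-1).toNat (s-1)) 0).getD "" = "1" := by
    simp [PySem.List.pyGet?, PySem.List.pyIdx?]
  rw [hget, show pyIntDigits "1" = 1 from by decide, List.set_cons_zero]
  rw [PySem.List.foldl_prod_mk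
    (fun (p : Int × Int) (_ : Int) => (p.1 * 10 + min 9 p.2, p.2 - min 9 p.2))
    (fun (q : Int × Int) (i : Int) =>
      (q.1 * 10 + max (if i = 0 then 1 else 0) (q.2 - 9 * (m - 1 - i)),
       q.2 - max (if i = 0 then 1 else 0) (q.2 - 9 * (m - 1 - i))))]
  simp only
  rw [Prod.mk.injEq]
  constructor
  · -- smallest sides
    rw [pyIntDigits, ← valChars, join_empty_sep, List.map_cons, List.flatten_cons,
        valChars_append]
    have hd := toStr_digit (1 + max 0 (s - 1 - 9 * (m - 1))) (by omega) (by omega)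
    have hf := hFill_val (m-1).toNat (s-1) (by omega)
    rw [hd.2, hf.1, hf.2]
    rw [PySem.List.pyRange_one_cons (by omega : (0:Int) < m), List.foldl_cons]
    simp only [if_true]
    rw [show (0:Int) + 1 = m - (((m-1).toNat : Nat) : Int) from by omega]
    rw [B_small_loop m (m-1).toNat _ _ (by omega) (by omega) (by omega)]
    rw [hj]
    rw [show s - max 1 (s - 9 * (m - 1 - 0)) = min (s-1) (9 * (m-1)) from by omega,
        show (0:Int) * 10 + max 1 (s - 9 * (m - 1 - 0)) = 1 + max 0 (s - 1 - 9 * (m-1)) from by omega]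
    ring
  · -- largest sides
    rw [pyIntDigits, ← valChars]
    exact couple_largest (PySem.List.pyRange 0 m 1) "" 0 s rfl (by omega)

-- ===== VERDICT (by name: the statement is the Claim_ definition above) =====
theorem sol_spec : Claim_equal_sol := by
  intro m s _ hpre
  unfold Spec_sol
  by_cases hg : (s = 0 ∧ 1 < m) ∨ 9 * m < s
  · simp only [sol, sol_alt, if_pos hg]
  · have hm1 : 1 ≤ m ∧ 0 ≤ s := by
      unfold Pre_sol at hpre; tauto
    by_cases hs0 : s = 0
    · have : m = 1 := by push Not at hg; omega
      subst this hs0; decide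
    · exact main_case m s hm1.1 (by omega) (by push Not at hg; omega)
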